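-- pv_equiv track=rewrite | github.com/sandrohp88/code_fight | arcade/python/higher_order_thinking.py | mergingVines
-- ===== SOURCE A (Python) =====
-- def mergingVines(vines, n):
--     '''
--     One summer Felicia was visiting her granny's summer house. There were several old and withered vines growing in the garden, that no longer produced grapes. Felicia found it sad, and decided to decorate the vines with wooden grapes she carved out herself. She also watered them with cola, since cola makes everything better.
--     When winter came, Felicia left, but the vines were still there, better than ever before. Each year they grew higher and wider, and the pairs of neighboring vines entangled together, forming a single vine. The wooden grapes were also doing just fine: they remained firmly attached to the vines.
--     Now that n years has passed, Felicia is going to visit her granny again, and she is curious about how the vines are doing. Given the number of grapes she hang on the vines, return the number of grapes on each vine after n years, assuming that each year the (2 * i - 1)th and the (2 * i)th vines (1-based) merged into a single vine (for each integer i in range [1, <number_of_vines> / 2]).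
--     Example
--     For vines = [1, 2, 3, 4, 5] and n = 2, the output should be
--     mergingVines(vines, n) = [10, 5].
--     After the first year vines two pairs of vines entangled: vines 1 and 2 and vines 3 and 4 (1-based). The last vine didn't have anything to entangle with. The vines could thus be represented as [3, 7, 5].
--     After the second year, another pair of vines entangled. The first and the second vines entangled, forming a single vine. It's possible to represent the vines as [10, 5], which is the answer.
--     '''
--     def nTimes(n):
--         def decorator(func):
--             def wrapper(vines):
--                 for i in range(n):
--                     vines = func(vines)
--                 return vines
--             return wrapper
--         return decorator
--
--     @nTimes(n)
--     def sumOnce(vines):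
--         res = [vines[i] + vines[i + 1] for i in range(0, len(vines) - 1, 2)]
--         if len(vines) % 2 == 1:
--             res.append(vines[-1])
--         return res
--
--     return sumOnce(vines)
-- ===== SOURCE B (Python) =====
-- def mergingVines(vines, n):
--     if n <= 0:
--         return list(vines)
--     block = 1 << min(n, len(vines).bit_length())
--     return [sum(vines[i:i + block]) for i in range(0, len(vines), block)]
-- ===== Notes on version B (the rewrite author's own statement) =====
-- stated objective: faster
-- what changed: Replaces the decorator-driven simulation of n merge passes by a single pass that sums consecutive blocks of 2^min(n, bit_length(len)) original elements (capping the block so huge n costs nothing).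
import Mathlib
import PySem

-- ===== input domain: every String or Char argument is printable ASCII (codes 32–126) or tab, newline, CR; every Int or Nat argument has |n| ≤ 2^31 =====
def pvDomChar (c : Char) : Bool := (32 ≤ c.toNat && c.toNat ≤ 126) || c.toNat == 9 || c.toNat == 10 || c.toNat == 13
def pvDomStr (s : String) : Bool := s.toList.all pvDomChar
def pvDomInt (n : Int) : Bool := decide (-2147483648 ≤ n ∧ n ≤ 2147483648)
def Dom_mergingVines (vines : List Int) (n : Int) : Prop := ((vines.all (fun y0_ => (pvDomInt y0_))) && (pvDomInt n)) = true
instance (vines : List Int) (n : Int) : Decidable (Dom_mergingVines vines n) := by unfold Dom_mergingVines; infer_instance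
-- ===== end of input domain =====

-- B replaces A's n simulated merge passes by one pass summing blocks of 2^min(n, bit_length(len)) elements.

-- ===== PORT A =====
-- sumOnce: res = [vines[i] + vines[i+1] for i in range(0, len(vines)-1, 2)]; odd length appends vines[-1].
-- (indices i, i+1 are always in range, and vines is nonempty in the odd branch, so pyGetD with default 0 is exact)
def pvSumOnce (vines : List Int) : List Int :=
  let res := (PySem.List.pyRange 0 ((vines.length : Int) - 1) 2).map
    (fun i => PySem.List.pyGetD vines i 0 + PySem.List.pyGetD vines (i + 1) 0)
  if PySem.Int.mod (vines.length : Int) 2 = 1 then res ++ [PySem.List.pyGetD vines (-1) 0] else res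

-- wrapper from @nTimes(n): for i in range(n): vines = sumOnce(vines)
def mergingVines (vines : List Int) (n : Int) : List Int :=
  (PySem.List.pyRange 0 n 1).foldl (fun v _ => pvSumOnce v) vines

-- ===== PORT B =====
def mergingVines_alt (vines : List Int) (n : Int) : List Int :=
  if n ≤ 0 then vines
  else
    let block : Int := 1 <<< (min n ((PySem.Int.bitLength (vines.length : Int) : Int))).toNat
    (PySem.List.pyRange 0 (vines.length : Int) block).map
      (fun i => (PySem.List.slice vines (some i) (some (i + block))).sum)

-- ===== PRECONDITION & SPEC =====
def Spec_mergingVines (vines : List Int) (n : Int) (out : List Int) : Prop := out = mergingVines_alt vines n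
instance (vines : List Int) (n : Int) (out : List Int) : Decidable (Spec_mergingVines vines n out) := by unfold Spec_mergingVines; infer_instance

-- ===== CLAIM (what is proved, stated in full; the proofs are below) =====
def Claim_equal_mergingVines : Prop := ∀ (vines : List Int) (n : Int), Dom_mergingVines vines n → Spec_mergingVines vines n (mergingVines vines n)

-- ===== LEMMAS AND PROOFS =====

-- sums of consecutive blocks of b elements, last block possibly short
def pvChunk (b : Nat) : List Int → List Int
  | [] => []
  | x :: xs => ((x :: xs).take b).sum :: pvChunk b (xs.drop (b - 1))
termination_by v => v.length
decreasing_by simp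

-- one merge pass, recursively
def pvPair : List Int → List Int
  | [] => []
  | [x] => [x]
  | x :: y :: r => (x + y) :: pvPair r

theorem pvChunk_nil (b : Nat) : pvChunk b [] = [] := by rw [pvChunk.eq_def]

theorem pvChunk_cons (b : Nat) (x : Int) (xs : List Int) :
    pvChunk b (x :: xs) = ((x :: xs).take b).sum :: pvChunk b (xs.drop (b - 1)) := by
  rw [pvChunk.eq_def]

theorem pvChunk_cons_drop {b : Nat} (hb : 1 ≤ b) (x : Int) (xs : List Int) :
    pvChunk b (x :: xs) = ((x :: xs).take b).sum :: pvChunk b ((x :: xs).drop b) := by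
  rw [pvChunk_cons]
  obtain ⟨m, rfl⟩ : ∃ m, b = m + 1 := ⟨b - 1, by omega⟩
  simp

theorem pvChunk_one (v : List Int) : pvChunk 1 v = v := by
  induction v with
  | nil => exact pvChunk_nil 1
  | cons x xs ih => rw [pvChunk_cons]; simp [ih]

theorem pvChunk_of_le {b : Nat} {v : List Int} (hv : v ≠ []) (h : v.length ≤ b) :
    pvChunk b v = [v.sum] := by
  match v with
  | x :: xs =>
    rw [pvChunk_cons, List.take_of_length_le h,
        List.drop_eq_nil_of_le (by simp at h ⊢; omega), pvChunk_nil]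

theorem pvPair_chunk (b : Nat) (hb : 1 ≤ b) (v : List Int) :
    pvPair (pvChunk b v) = pvChunk (2 * b) v := by
  have key : ∀ (k : Nat) (v : List Int), v.length ≤ k →
      pvPair (pvChunk b v) = pvChunk (2 * b) v := by
    intro k
    induction k with
    | zero =>
      intro v hv
      have : v = [] := List.eq_nil_of_length_eq_zero (by omega)
      subst this
      rw [pvChunk_nil, pvChunk_nil]; rfl
    | succ k ih =>
      intro v hv
      cases v with
      | nil => rw [pvChunk_nil, pvChunk_nil]; rfl
      | cons x xs =>
        rw [pvChunk_cons_drop hb]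
        cases hw : (x :: xs).drop b with
        | nil =>
          have hlen : (x :: xs).length ≤ b := by
            have h1 := congrArg List.length hw
            simp only [List.length_drop, List.length_nil] at h1
            exact Nat.le_of_sub_eq_zero h1
          rw [pvChunk_nil]
          show pvPair [((x :: xs).take b).sum] = _
          have h2b : (x :: xs).length ≤ 2 * b := by omega
          rw [List.take_of_length_le hlen, pvChunk_of_le (by simp) h2b]
          rfl
        | cons y ys =>
          have h1 := congrArg List.length hw
          simp only [List.length_drop, List.length_cons] at h1
          rw [pvChunk_cons_drop hb]
          show pvPair (_ :: _ :: _) = _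
          rw [pvPair]
          have ihw : pvPair (pvChunk b ((y :: ys).drop b)) = pvChunk (2 * b) ((y :: ys).drop b) := by
            apply ih
            simp only [List.length_drop, List.length_cons] at hv ⊢
            omega
          rw [ihw, pvChunk_cons_drop (show 1 ≤ 2 * b by omega)]
          congr 1
          · rw [two_mul, List.take_add, List.sum_append, hw]
          · rw [← hw, List.drop_drop, ← two_mul b]
  exact key v.length v le_rfl

-- range(0, m, b) for positive b and m: peel off the first index
theorem pvRange_pos_cons {b m : Int} (hb : 0 < b) (hm : 0 < m) :
    PySem.List.pyRange 0 m b = 0 :: (PySem.List.pyRange 0 (m - b) b).map (· + b) := by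
  rw [PySem.List.pyRange_of_pos _ _ hb, PySem.List.pyRange_of_pos _ _ hb, if_pos hm]
  by_cases h2 : 0 < m - b
  · rw [if_pos h2]
    have hdiv : (m - 0 + b - 1) / b = (m - b - 0 + b - 1) / b + 1 := by
      have h1 : m - 0 + b - 1 = (m - b - 0 + b - 1) + 1 * b := by ring
      rw [h1, Int.add_mul_ediv_right _ _ (by omega)]
    have hnn : 0 ≤ (m - b - 0 + b - 1) / b := Int.ediv_nonneg (by omega) (by omega)
    have hcnt : ((m - 0 + b - 1) / b).toNat = ((m - b - 0 + b - 1) / b).toNat + 1 := by omega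
    rw [hcnt, List.range_succ_eq_map]
    simp only [List.map_cons, List.map_map]
    congr 1
    · simp
    · apply List.map_congr_left
      intro k _
      simp only [Function.comp_apply]
      push_cast
      ring
  · rw [if_neg h2]
    have h1 : (m - 0 + b - 1) / b = 1 := by
      have h := (PySem.Int.floordiv_eq_iff_of_pos hb).mpr
        (⟨by omega, by omega⟩ : 1 * b ≤ m - 0 + b - 1 ∧ m - 0 + b - 1 < (1 + 1) * b)
      rwa [PySem.Int.floordiv_eq_ediv_of_pos hb] at h
    have hcnt : ((m - 0 + b - 1) / b).toNat = 1 := by omega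
    rw [hcnt]
    simp

theorem pvRange_pos_nil {b m : Int} (hb : 0 < b) (hm : m ≤ 0) :
    PySem.List.pyRange 0 m b = [] := by
  rw [PySem.List.pyRange_of_pos _ _ hb, if_neg (by omega)]
  simp

theorem pvSumOnce_single (x : Int) : pvSumOnce [x] = [x] := by
  unfold pvSumOnce
  rw [show ((([x] : List Int).length : Int)) = 1 by simp]
  rw [show ((1 : Int) - 1) = 0 by ring, pvRange_pos_nil (by norm_num) le_rfl,
      if_pos (by decide), PySem.List.pyGetD_neg_one [x] 0 (by simp)]
  simp

theorem pvSumOnce_cons (x y : Int) (r : List Int) :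
    pvSumOnce (x :: y :: r) = (x + y) :: pvSumOnce r := by
  unfold pvSumOnce
  have hlen : (((x :: y :: r).length : Int) - 1) = (r.length : Int) + 1 := by
    push_cast [List.length_cons]
    ring
  rw [hlen, pvRange_pos_cons (by norm_num) (by positivity)]

  simp only [List.map_cons, List.map_map]
  have hmod : PySem.Int.mod ((x :: y :: r).length : Int) 2 = PySem.Int.mod (r.length : Int) 2 := by
    rw [PySem.Int.mod_eq_emod_of_pos (by norm_num), PySem.Int.mod_eq_emod_of_pos (by norm_num)]
    have h : ((x :: y :: r).length : Int) = (r.length : Int) + 2 := by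
      push_cast [List.length_cons]
      ring
    rw [h]
    omega
  have htail : ((PySem.List.pyRange 0 ((r.length : Int) + 1 - 2) 2).map
        ((fun i => PySem.List.pyGetD (x :: y :: r) i 0 + PySem.List.pyGetD (x :: y :: r) (i + 1) 0) ∘ (· + 2)))
      = (PySem.List.pyRange 0 ((r.length : Int) - 1) 2).map
        (fun i => PySem.List.pyGetD r i 0 + PySem.List.pyGetD r (i + 1) 0) := by
    rw [show ((r.length : Int) + 1 - 2) = (r.length : Int) - 1 by ring]
    apply List.map_congr_left
    intro i hi
    have h0 : 0 ≤ i := ((PySem.List.mem_pyRange_iff_of_pos (by norm_num) i).mp hi).1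
    simp only [Function.comp_apply]
    rw [PySem.List.pyGetD_of_nonneg _ _ (by omega), PySem.List.pyGetD_of_nonneg _ _ (by omega),
        PySem.List.pyGetD_of_nonneg _ _ (by omega), PySem.List.pyGetD_of_nonneg _ _ (by omega)]
    have h2 : (i + 2).toNat = i.toNat + 2 := by omega
    have h3 : (i + 2 + 1).toNat = (i + 1).toNat + 2 := by omega
    rw [h2, h3]
    simp [List.getD]
  have hx : PySem.List.pyGetD (x :: y :: r) 0 0 = x := by simp [pysem]
  have hy : PySem.List.pyGetD (x :: y :: r) (0 + 1) 0 = y := by norm_num [pysem]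
  rw [hmod, htail]
  by_cases hodd : PySem.Int.mod ((r.length : Int)) 2 = 1
  · have hr : r ≠ [] := by
      rintro rfl
      revert hodd
      decide
    rw [if_pos hodd, if_pos hodd, hx, hy,
        PySem.List.pyGetD_neg_one (x :: y :: r) 0 (by simp), PySem.List.pyGetD_neg_one r 0 hr,
        List.getLast_cons (by simp), List.getLast_cons hr, List.cons_append]
  · rw [if_neg hodd, if_neg hodd, hx, hy]

theorem pvSumOnce_eq_pair (v : List Int) : pvSumOnce v = pvPair v := by
  induction v using pvPair.induct with
  | case1 => decide
  | case2 x => rw [pvSumOnce_single]; rfl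
  | case3 x y r ih => rw [pvSumOnce_cons, ih, pvPair]

theorem pvFoldl_const {α β : Type} (g : α → α) (l : List β) (init : α) :
    l.foldl (fun v _ => g v) init = g^[l.length] init := by
  induction l generalizing init with
  | nil => rfl
  | cons y ys ih => simpa [Function.iterate_succ_apply] using ih (g init)

theorem pvIterate_chunk (k : Nat) (v : List Int) : pvPair^[k] v = pvChunk (2 ^ k) v := by
  induction k generalizing v with
  | zero => simp [pvChunk_one]
  | succ k ih =>
    rw [Function.iterate_succ_apply', ih, pvPair_chunk _ (Nat.one_le_two_pow), pow_succ, mul_comm]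

theorem pvAlt_chunk (b : Nat) (hb : 0 < b) (v : List Int) :
    (PySem.List.pyRange 0 (v.length : Int) (b : Int)).map
      (fun i => (PySem.List.slice v (some i) (some (i + (b : Int)))).sum) = pvChunk b v := by
  have hbZ : (0 : Int) < (b : Int) := by exact_mod_cast hb
  have key : ∀ (k : Nat) (v : List Int), v.length ≤ k →
      (PySem.List.pyRange 0 (v.length : Int) (b : Int)).map
        (fun i => (PySem.List.slice v (some i) (some (i + (b : Int)))).sum) = pvChunk b v := by
    intro k
    induction k with
    | zero =>
      intro v hv
      have : v = [] := List.eq_nil_of_length_eq_zero (by omega)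
      subst this
      rw [pvChunk_nil]
      simp [pvRange_pos_nil hbZ le_rfl]
    | succ k ih =>
      intro v hv
      cases v with
      | nil =>
        rw [pvChunk_nil]
        simp [pvRange_pos_nil hbZ le_rfl]
      | cons x xs =>
        rw [pvRange_pos_cons hbZ (by push_cast [List.length_cons]; omega), List.map_cons, List.map_map,
            pvChunk_cons_drop hb]
        congr 1
        · rw [zero_add, PySem.List.slice_zero_start, PySem.List.slice_to _ (by omega)]
          simp
        · have hfun : ((PySem.List.pyRange 0 (((x :: xs).length : Int) - (b : Int)) (b : Int)).map
              ((fun i => (PySem.List.slice (x :: xs) (some i) (some (i + (b : Int)))).sum) ∘ (· + (b : Int))))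
              = (PySem.List.pyRange 0 (((x :: xs).length : Int) - (b : Int)) (b : Int)).map
              (fun i => (PySem.List.slice ((x :: xs).drop b) (some i) (some (i + (b : Int)))).sum) := by
            apply List.map_congr_left
            intro i hi
            have h0 : 0 ≤ i := ((PySem.List.mem_pyRange_iff_of_pos hbZ i).mp hi).1
            simp only [Function.comp_apply]
            have s1 : PySem.List.slice (x :: xs) (some (i + (b : Int))) (some (i + (b : Int) + (b : Int)))
                = List.take ((i + (b : Int) + (b : Int)).toNat - (i + (b : Int)).toNat)
                    (List.drop (i + (b : Int)).toNat (x :: xs)) :=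
              PySem.List.slice_toNat _ (by omega) (by omega)
            have s2 : PySem.List.slice ((x :: xs).drop b) (some i) (some (i + (b : Int)))
                = List.take ((i + (b : Int)).toNat - i.toNat)
                    (List.drop i.toNat ((x :: xs).drop b)) :=
              PySem.List.slice_toNat _ (by omega) (by omega)
            rw [s1, s2, List.drop_drop]
            have e1 : (i + (b : Int)).toNat = i.toNat + b := by
              rw [Int.toNat_add h0 (Int.natCast_nonneg b), Int.toNat_natCast]
            have e2 : (i + (b : Int) + (b : Int)).toNat = i.toNat + b + b := by
              rw [Int.toNat_add (add_nonneg h0 (Int.natCast_nonneg b)) (Int.natCast_nonneg b),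
                  e1, Int.toNat_natCast]
            rw [e1, e2]
            have c1 : i.toNat + b + b - (i.toNat + b) = b := Nat.add_sub_cancel_left (i.toNat + b) b
            have c2 : i.toNat + b - i.toNat = b := Nat.add_sub_cancel_left i.toNat b
            rw [c1, c2, Nat.add_comm b i.toNat]
          rw [hfun]
          by_cases hble : b ≤ (x :: xs).length
          · have hdl : ((((x :: xs).drop b).length : Int)) = ((x :: xs).length : Int) - (b : Int) := by
              rw [List.length_drop]
              omega
            rw [← hdl]
            apply ih
            rw [List.length_drop]
            omega
          · have hlt : (x :: xs).length < b := by omega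
            have h1 : ((x :: xs).length : Int) - (b : Int) ≤ 0 := by omega
            have h2 : (x :: xs).drop b = [] := List.drop_eq_nil_of_le (by omega)
            rw [pvRange_pos_nil hbZ h1, h2, pvChunk_nil]
            rfl
  exact key v.length v le_rfl

theorem pvChunk_stable {b₁ b₂ : Nat} (v : List Int) (h₁ : v.length ≤ b₁) (h₂ : v.length ≤ b₂) :
    pvChunk b₁ v = pvChunk b₂ v := by
  cases v with
  | nil => rw [pvChunk_nil, pvChunk_nil]
  | cons x xs =>
    rw [pvChunk_of_le (by simp) h₁, pvChunk_of_le (by simp) h₂]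

-- ===== VERDICT (by name: the statement is the Claim_ definition above) =====
theorem mergingVines_spec : Claim_equal_mergingVines := by
  intro vines n _
  unfold Spec_mergingVines
  by_cases hn : n ≤ 0
  · unfold mergingVines mergingVines_alt
    rw [if_pos hn, PySem.List.pyRange_one_eq_nil hn]
    rfl
  · have hlhs : mergingVines vines n = pvChunk (2 ^ n.toNat) vines := by
      unfold mergingVines
      rw [pvFoldl_const, PySem.List.length_pyRange_one,
          show (pvSumOnce = pvPair) from funext pvSumOnce_eq_pair, pvIterate_chunk]
      congr 2
      omega
    have hrhs : mergingVines_alt vines n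
        = pvChunk (2 ^ (min n ((PySem.Int.bitLength ((vines.length : Int)) : Int))).toNat) vines := by
      unfold mergingVines_alt
      rw [if_neg hn]
      show (PySem.List.pyRange 0 ((vines.length : Int))
          ((1 : Int) <<< (min n ((PySem.Int.bitLength ((vines.length : Int)) : Int))).toNat)).map
          (fun i => (PySem.List.slice vines (some i)
            (some (i + (1 : Int) <<< (min n ((PySem.Int.bitLength ((vines.length : Int)) : Int))).toNat))).sum)
        = _
      have hshift : (1 : Int) <<< (min n ((PySem.Int.bitLength ((vines.length : Int)) : Int))).toNat
          = (((2 ^ (min n ((PySem.Int.bitLength ((vines.length : Int)) : Int))).toNat : Nat) : Int)) := by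
        rw [Int.shiftLeft_eq]
        push_cast
        ring
      rw [hshift]
      exact pvAlt_chunk _ (Nat.two_pow_pos _) vines
    rw [hlhs, hrhs]
    replace hn : 0 < n := by omega
    have hL : vines.length < 2 ^ (PySem.Int.bitLength ((vines.length : Int))) := by
      have := PySem.Int.lt_two_pow_bitLength ((vines.length : Int))
      simpa using this
    by_cases hc : n ≤ ((PySem.Int.bitLength ((vines.length : Int)) : Int))
    · rw [min_eq_left hc]
    · replace hc : ((PySem.Int.bitLength ((vines.length : Int)) : Int)) < n := by omega
      rw [min_eq_right (le_of_lt hc)]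
      have hnt : PySem.Int.bitLength ((vines.length : Int)) ≤ n.toNat := by omega
      apply pvChunk_stable
      · exact le_of_lt (lt_of_lt_of_le hL (Nat.pow_le_pow_right (by norm_num) hnt))
      · simpa using le_of_lt hL
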